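-- pv_equiv track=rewrite | github.com/GavinFrazar/foo.bar | level3/doomsday_fuel/solution.py | partitionMatrix
-- ===== SOURCE A (Python) =====
-- def partitionMatrix(M):
--     #-- TODO -- fix up notation here
--     nt_rows = []
--     t_rows = []
--     for i in range(len(M)):
--         if sum(M[i]) > 0: #indicates non terminal state
--             nt_rows.append(i)
--         else:
--             t_rows.append(i)
--
--     q_key = {}
--     for row in nt_rows:
--         q_key[row] = [col for col in nt_rows]
--
--     r_key = {}
--     for row in nt_rows:
--         r_key[row] = [col for col in t_rows]
--
--     Q = [[M[i][j] for j in q_key[i]] for i in q_key]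
--     R = [[M[i][j] for j in r_key[i]] for i in q_key]
--     return Q, R, t_rows
-- ===== SOURCE B (Python) =====
-- def partitionMatrix(M):
--     n = len(M)
--     t_rows = [i for i in range(n) if sum(M[i]) <= 0]
--     tset = set(t_rows)
--     nt_count = n - len(t_rows)
--     # build Q and R column-wise: each column of the result, restricted to non-terminal rows
--     qcols, rcols = [], []
--     for j in range(n):
--         col = [M[i][j] for i in range(n) if i not in tset]
--         if j in tset:
--             rcols.append(col)
--         else:
--             qcols.append(col)
--     # transpose the column lists back into rows
--     Q = [[col[k] for col in qcols] for k in range(nt_count)]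
--     R = [[col[k] for col in rcols] for k in range(nt_count)]
--     return Q, R, t_rows
-- ===== Notes on version B (the rewrite author's own statement) =====
-- stated objective: alternative
-- what changed: B builds the result column-wise — for each column index it extracts the column restricted to non-terminal rows, distributing it into Q-columns or R-columns, and then transposes those column lists back into rows — instead of A's row-major gather through per-row index-list dictionaries.
import Mathlib
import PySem

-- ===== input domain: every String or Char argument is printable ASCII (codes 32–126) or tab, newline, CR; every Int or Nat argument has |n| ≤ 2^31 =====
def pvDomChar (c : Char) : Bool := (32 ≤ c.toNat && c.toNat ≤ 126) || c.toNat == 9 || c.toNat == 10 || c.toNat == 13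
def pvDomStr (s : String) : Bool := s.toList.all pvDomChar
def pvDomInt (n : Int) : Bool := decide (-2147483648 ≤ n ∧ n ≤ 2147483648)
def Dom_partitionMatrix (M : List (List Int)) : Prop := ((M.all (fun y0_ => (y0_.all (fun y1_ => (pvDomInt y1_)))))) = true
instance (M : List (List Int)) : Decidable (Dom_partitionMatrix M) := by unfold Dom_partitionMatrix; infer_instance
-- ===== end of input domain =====

-- B builds the result column-wise (each Q/R column restricted to non-terminal rows) and then
-- transposes, instead of A's row-major gather through index-list dictionaries (alternative, same cost).

-- ===== PORT A =====
-- classification loop: for i in range(len(M)): append i to nt_rows if sum(M[i]) > 0 else to t_rows;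
-- then the q_key/r_key dicts and the two gather comprehensions, step for step.
def partitionMatrix (M : List (List Int)) : List (List Int) × List (List Int) × List Int :=
  let cls := (PySem.List.pyRange 0 (M.length) 1).foldl
      (fun (p : List Int × List Int) i =>
        if 0 < (PySem.List.pyGetD M i []).sum then (p.1 ++ [i], p.2) else (p.1, p.2 ++ [i]))
      ([], [])
  let nt_rows := cls.1
  let t_rows := cls.2
  let q_key := nt_rows.foldl
      (fun (d : PySem.Dict Int (List Int)) row => d.insert row (nt_rows.map (fun col => col)))
      PySem.Dict.empty
  let r_key := nt_rows.foldl
      (fun (d : PySem.Dict Int (List Int)) row => d.insert row (t_rows.map (fun col => col)))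
      PySem.Dict.empty
  let Q := (PySem.Dict.keys q_key).map
      (fun i => (PySem.Dict.getD q_key i []).map
        (fun j => PySem.List.pyGetD (PySem.List.pyGetD M i []) j 0))
  let R := (PySem.Dict.keys q_key).map
      (fun i => (PySem.Dict.getD r_key i []).map
        (fun j => PySem.List.pyGetD (PySem.List.pyGetD M i []) j 0))
  (Q, R, t_rows)

-- ===== PORT B =====
-- t_rows by a filter comprehension, tset = set(t_rows), the column-building loop over j
-- (distributing each column into rcols/qcols), then the two transposing comprehensions.
def partitionMatrix_alt (M : List (List Int)) : List (List Int) × List (List Int) × List Int :=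
  let t_rows := (PySem.List.pyRange 0 (M.length) 1).filter
      (fun i => decide ((PySem.List.pyGetD M i []).sum ≤ 0))
  let tset : PySem.Set Int := PySem.Set.ofList t_rows
  let nt_count : Int := (M.length : Int) - (t_rows.length : Int)
  let cols := (PySem.List.pyRange 0 (M.length) 1).foldl
      (fun (p : List (List Int) × List (List Int)) j =>
        let col := ((PySem.List.pyRange 0 (M.length) 1).filter
            (fun i => !(PySem.Set.contains tset i))).map
          (fun i => PySem.List.pyGetD (PySem.List.pyGetD M i []) j 0)
        if PySem.Set.contains tset j then (p.1, p.2 ++ [col]) else (p.1 ++ [col], p.2))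
      ([], [])
  let Q := (PySem.List.pyRange 0 nt_count 1).map
      (fun k => cols.1.map (fun col => PySem.List.pyGetD col k 0))
  let R := (PySem.List.pyRange 0 nt_count 1).map
      (fun k => cols.2.map (fun col => PySem.List.pyGetD col k 0))
  (Q, R, t_rows)

-- ===== PRECONDITION & SPEC =====
-- Pre_ excludes exactly the inputs on which the Python A raises IndexError (and B does too): a
-- non-terminal row (positive sum) shorter than len(M), whose cells M[i][j] the gathers index out of range.
def Pre_partitionMatrix (M : List (List Int)) : Prop :=
  ∀ row ∈ M, 0 < row.sum → M.length ≤ row.length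
instance (M : List (List Int)) : Decidable (Pre_partitionMatrix M) := by
  unfold Pre_partitionMatrix; infer_instance
def pvWitness_partitionMatrix : List (List Int) := [[0, 1], [0, 0]]
def Spec_partitionMatrix (M : List (List Int)) (out : List (List Int) × List (List Int) × List Int) : Prop := out = partitionMatrix_alt M
instance (M : List (List Int)) (out : List (List Int) × List (List Int) × List Int) : Decidable (Spec_partitionMatrix M out) := by unfold Spec_partitionMatrix; infer_instance

-- ===== CLAIM (what is proved, stated in full; the proofs are below) =====
def Claim_equal_partitionMatrix : Prop := ∀ (M : List (List Int)), Dom_partitionMatrix M → Pre_partitionMatrix M → Spec_partitionMatrix M (partitionMatrix M)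

-- ===== LEMMAS AND PROOFS =====

-- a two-way distributing fold (Prop test): items with c go (mapped) to the left list, the rest to the right
theorem pv_foldl_splitP {α β : Type} (l : List α) (c : α → Prop) [DecidablePred c] (f : α → β) (a b : List β) :
    l.foldl (fun (p : List β × List β) x =>
        if c x then (p.1 ++ [f x], p.2) else (p.1, p.2 ++ [f x])) (a, b)
      = (a ++ (l.filter (fun x => decide (c x))).map f,
         b ++ (l.filter (fun x => !decide (c x))).map f) := by
  induction l generalizing a b with
  | nil => simp
  | cons x xs ih => by_cases h : c x <;> simp [h, ih]

-- the same with a Bool test, true-branch appending to the RIGHT list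
theorem pv_foldl_split' {α β : Type} (l : List α) (c : α → Bool) (f : α → β) (a b : List β) :
    l.foldl (fun (p : List β × List β) x =>
        if c x then (p.1, p.2 ++ [f x]) else (p.1 ++ [f x], p.2)) (a, b)
      = (a ++ (l.filter (fun x => !c x)).map f, b ++ (l.filter c).map f) := by
  induction l generalizing a b with
  | nil => simp
  | cons x xs ih => by_cases h : c x <;> simp [h, ih]

-- reading a list back through range-indexed getD is the list itself (mapped)
theorem pv_map_range_getD {α β : Type} (L : List α) (d : α) (h : α → β) :
    (List.range L.length).map (fun k => h (L.getD k d)) = L.map h := by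
  apply List.ext_getElem
  · simp
  · intro k h1 h2
    simp [List.getD_eq_getElem?_getD, List.getElem?_eq_getElem (by simpa using h2)]

-- A's dict pattern: keys of a constant-value insert fold over a Nodup list, read back with getD
theorem pv_gather (L : List Int) (hL : L.Nodup) (v w : List Int)
    (f : Int → List Int → List Int) :
    (((L.foldl (fun d row => d.insert row v) PySem.Dict.empty).keys).map
      (fun i => f i ((L.foldl (fun d row => d.insert row w) PySem.Dict.empty).getD i [])))
    = L.map (fun i => f i w) := by
  have hv : (L.foldl (fun d row => d.insert row v) PySem.Dict.empty).items
      = L.map (fun a => (a, v)) := by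
    simpa using PySem.Dict.items_foldl_insert_fresh L (fun a => a) (fun _ => v)
      PySem.Dict.empty (by simp) (by simpa using hL)
  have hw : (L.foldl (fun d row => d.insert row w) PySem.Dict.empty).items
      = L.map (fun a => (a, w)) := by
    simpa using PySem.Dict.items_foldl_insert_fresh L (fun a => a) (fun _ => w)
      PySem.Dict.empty (by simp) (by simpa using hL)
  have hkeysv : (L.foldl (fun d row => d.insert row v) PySem.Dict.empty).keys = L := by
    simp [PySem.Dict.keys, hv, Function.comp_def]
  have hkeysw : (L.foldl (fun d row => d.insert row w) PySem.Dict.empty).keys = L := by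
    simp [PySem.Dict.keys, hw, Function.comp_def]
  rw [hkeysv]
  apply List.map_congr_left
  intro i hi
  congr 1
  exact PySem.Dict.getD_of_mem_items _ (hw ▸ List.mem_map_of_mem hi)
    (by rw [hkeysw]; exact hL) []

-- the common normal form: non-terminal / terminal row indices
def pvNT (M : List (List Int)) : List Int :=
  ((List.range M.length).filter (fun k => 0 < (M.getD k []).sum)).map (fun (k : Nat) => (k : Int))
def pvT (M : List (List Int)) : List Int :=
  ((List.range M.length).filter (fun k => ¬ 0 < (M.getD k []).sum)).map (fun (k : Nat) => (k : Int))

theorem pv_decide (s : Int) : decide (s ≤ 0) = !decide (0 < s) := by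
  by_cases h : 0 < s
  · simp [h, not_le.mpr h]
  · simp [h, not_lt.mp h]

theorem pvA (M : List (List Int)) :
    ((PySem.List.pyRange 0 (M.length) 1).foldl
      (fun (p : List Int × List Int) i =>
        if 0 < (PySem.List.pyGetD M i []).sum then (p.1 ++ [i], p.2) else (p.1, p.2 ++ [i]))
      ([], []))
    = (pvNT M, pvT M) := by
  rw [pv_foldl_splitP (PySem.List.pyRange 0 (M.length) 1)
        (fun i => 0 < (PySem.List.pyGetD M i []).sum) (fun i => i) [] []]
  have hpred : (fun k : Nat => decide ((M[k]?.getD []).sum ≤ 0))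
      = (fun k : Nat => !decide (0 < (M[k]?.getD []).sum)) := by
    funext k
    exact pv_decide _
  simp [pvNT, pvT, PySem.List.pyRange_zero_nat, List.filter_map, Function.comp_def, hpred]

theorem partitionMatrix_eq_canon (M : List (List Int)) :
    partitionMatrix M =
      ((pvNT M).map (fun i => (pvNT M).map (fun j => PySem.List.pyGetD (PySem.List.pyGetD M i []) j 0)),
       (pvNT M).map (fun i => (pvT M).map (fun j => PySem.List.pyGetD (PySem.List.pyGetD M i []) j 0)),
       pvT M) := by
  have hNodup : (pvNT M).Nodup :=
    (List.nodup_range.filter _).map (fun a b h => by exact_mod_cast h)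
  simp only [partitionMatrix]
  rw [pvA M]
  simp only [List.map_id']
  rw [pv_gather (pvNT M) hNodup (pvNT M) (pvNT M)
        (fun i xs => xs.map (fun j => PySem.List.pyGetD (PySem.List.pyGetD M i []) j 0)),
      pv_gather (pvNT M) hNodup (pvNT M) (pvT M)
        (fun i xs => xs.map (fun j => PySem.List.pyGetD (PySem.List.pyGetD M i []) j 0))]

-- B's t_rows is pvT
theorem pvB_trows (M : List (List Int)) :
    (PySem.List.pyRange 0 (M.length) 1).filter
        (fun i => decide ((PySem.List.pyGetD M i []).sum ≤ 0)) = pvT M := by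
  have hpred : (fun k : Nat => decide ((M[k]?.getD []).sum ≤ 0))
      = (fun k : Nat => !decide (0 < (M[k]?.getD []).sum)) := by
    funext k; exact pv_decide _
  simp [pvT, PySem.List.pyRange_zero_nat, List.filter_map, Function.comp_def, hpred]

-- membership in tset decides terminality of the index, on in-range indices
theorem pvB_contains (M : List (List Int)) (k : Nat) (hlen : k < M.length) :
    PySem.Set.contains (PySem.Set.ofList (pvT M)) ((k : Int)) = !decide (0 < (M.getD k []).sum) := by
  have hmem : ((k : Int) ∈ pvT M) ↔ ¬ 0 < (M.getD k []).sum := by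
    simp only [pvT, List.mem_map, List.mem_filter, List.mem_range, decide_not]
    constructor
    · rintro ⟨m, ⟨hm1, hm2⟩, he⟩
      have : m = k := by exact_mod_cast he
      subst this
      simpa using hm2
    · intro h
      exact ⟨k, ⟨hlen, by simpa using h⟩, rfl⟩
  simp [PySem.Set.contains_eq_listContains, hmem]
  exact pv_decide _

-- lengths of a filter and its complement add up
theorem pv_length_filter_split {α : Type} (l : List α) (p : α → Bool) :
    (l.filter p).length + (l.filter (fun a => !p a)).length = l.length := by
  induction l with
  | nil => simp
  | cons x xs ih => by_cases h : p x <;> simp [h] <;> omega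

theorem partitionMatrix_alt_eq_canon (M : List (List Int)) :
    partitionMatrix_alt M =
      ((pvNT M).map (fun i => (pvNT M).map (fun j => PySem.List.pyGetD (PySem.List.pyGetD M i []) j 0)),
       (pvNT M).map (fun i => (pvT M).map (fun j => PySem.List.pyGetD (PySem.List.pyGetD M i []) j 0)),
       pvT M) := by
  simp only [partitionMatrix_alt, pvB_trows]
  rw [pv_foldl_split']
  -- the two index filters are pvNT / pvT
  have hfNT : (PySem.List.pyRange 0 (M.length) 1).filter
      (fun i => !(PySem.Set.contains (PySem.Set.ofList (pvT M)) i)) = pvNT M := by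
    rw [PySem.List.pyRange_zero_nat, List.filter_map,
        List.filter_congr (fun k hk => by
          simp only [Function.comp_apply, pvB_contains M k (List.mem_range.mp hk), Bool.not_not]
          rfl)]
    rfl
  have hfT : (PySem.List.pyRange 0 (M.length) 1).filter
      (fun i => PySem.Set.contains (PySem.Set.ofList (pvT M)) i) = pvT M := by
    rw [PySem.List.pyRange_zero_nat, List.filter_map,
        List.filter_congr (fun k hk => by
          simp only [Function.comp_apply, pvB_contains M k (List.mem_range.mp hk)]
          rfl)]
    unfold pvT
    congr 1
    apply List.filter_congr
    intro k _
    rw [decide_not]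
  rw [hfNT, hfT]
  -- the length bookkeeping: nt_count = |pvNT M|
  have hm : (M.length : Int) - ((pvT M).length : Int) = ((pvNT M).length : Int) := by
    have h := pv_length_filter_split (List.range M.length) (fun k => decide (0 < (M.getD k []).sum))
    simp only [List.length_range] at h
    have hq : (fun (k : Nat) => decide (¬ 0 < (M.getD k []).sum))
        = (fun (k : Nat) => !decide (0 < (M.getD k []).sum)) := by
      funext k; rw [decide_not]
    simp only [pvNT, pvT, List.length_map, hq]
    omega
  rw [hm, PySem.List.pyRange_zero_natCast]
  -- transpose back: row k of the transposed columns is row (pvNT M)[k] of the canon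
  have htr : ∀ (rows cols : List Int),
      (List.range rows.length).map (fun (k : Nat) =>
          (cols.map (fun j => rows.map
              (fun i => PySem.List.pyGetD (PySem.List.pyGetD M i []) j 0))).map
            (fun col => PySem.List.pyGetD col ((k : Nat) : Int) 0))
        = rows.map (fun i => cols.map (fun j => PySem.List.pyGetD (PySem.List.pyGetD M i []) j 0)) := by
    intro rows cols
    rw [← pv_map_range_getD rows 0 (fun i => cols.map (fun j => PySem.List.pyGetD (PySem.List.pyGetD M i []) j 0))]
    apply List.map_congr_left
    intro k hk
    rw [List.map_map]
    apply List.map_congr_left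
    intro j hj
    simp only [Function.comp_apply, PySem.List.pyGetD_natCast]
    rw [List.getD_eq_getElem?_getD, List.getElem?_map,
        List.getElem?_eq_getElem (by simpa using List.mem_range.mp hk)]
    simp [List.getD_eq_getElem?_getD, List.getElem?_eq_getElem (List.mem_range.mp hk)]
  simp only [List.map_map, Function.comp_def]
  rw [Prod.mk.injEq, Prod.mk.injEq]
  refine ⟨?_, ?_, rfl⟩ <;> simp only [List.nil_append]
  · exact htr (pvNT M) (pvNT M)
  · exact htr (pvNT M) (pvT M)

-- ===== VERDICT (by name: the statement is the Claim_ definition above) =====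
theorem partitionMatrix_spec : Claim_equal_partitionMatrix := by
  intro M _ _
  unfold Spec_partitionMatrix
  rw [partitionMatrix_eq_canon, partitionMatrix_alt_eq_canon]
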